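-- pv_equiv track=rewrite | github.com/VasiliuAdelin/Artificial-Intelligence-Python | polls/views.py | getMovieListWithoutRating
-- ===== SOURCE A (Python) =====
-- from collections import defaultdict
--
-- def getMovieListWithoutRating(finalMovieList, tokens):
--     dicDeFrec = defaultdict(list)
--     for movie in finalMovieList:
--         # rating = MySqlConn.returnRatingForMovieId(movie)
--         dicDeFrec[finalMovieList[movie]].append(movie)
--     max_films = 6
--     movielist = []
--     frec = tokens
--     for i in range(tokens, 0, -1):
--         if dicDeFrec[i] != []:
--             for j in dicDeFrec[i]:
--                 if max_films != 0:
--                     movielist.append(j)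
--                     max_films = max_films - 1
--                 else:
--                     break
--     return movielist
-- ===== SOURCE B (Python) =====
-- def getMovieListWithoutRating(finalMovieList, tokens):
--     # filter once, then one stable descending sort and a slice,
--     # instead of bucketing by frequency and scanning every i in range(tokens, 0, -1)
--     eligible = [m for m in finalMovieList if 1 <= finalMovieList[m] <= tokens]
--     return sorted(eligible, key=lambda m: finalMovieList[m], reverse=True)[:6]
-- ===== Notes on version B (the rewrite author's own statement) =====
-- stated objective: alternative
-- what changed: Replaces the frequency-bucket defaultdict plus a countdown scan over every integer in range(tokens, 0, -1) by a single filter of the eligible movies, one stable descending sort, and a [:6] slice.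
import Mathlib
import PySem

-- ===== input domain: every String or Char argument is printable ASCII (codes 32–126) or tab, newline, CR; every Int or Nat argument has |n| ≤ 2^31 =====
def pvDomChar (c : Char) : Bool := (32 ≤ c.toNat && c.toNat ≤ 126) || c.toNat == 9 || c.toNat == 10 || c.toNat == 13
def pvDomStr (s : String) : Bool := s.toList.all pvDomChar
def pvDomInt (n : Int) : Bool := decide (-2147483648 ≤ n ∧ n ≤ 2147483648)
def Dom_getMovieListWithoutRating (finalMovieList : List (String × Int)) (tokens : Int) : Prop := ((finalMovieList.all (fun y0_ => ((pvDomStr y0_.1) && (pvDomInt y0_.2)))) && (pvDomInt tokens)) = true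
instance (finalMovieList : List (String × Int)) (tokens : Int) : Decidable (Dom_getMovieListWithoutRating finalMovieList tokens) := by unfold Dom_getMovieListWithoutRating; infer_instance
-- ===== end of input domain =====

-- B replaces A's frequency buckets plus a countdown scan over every integer in range(tokens, 0, -1)
-- by one filter of the eligible movies, one stable descending sort, and a [:6] slice (objective: alternative).
-- The dict argument arrives as an association list; both ports read it through PySem.Dict.ofList,
-- which is exactly Python's dict(pairs) (last value wins, position of first occurrence kept).

-- ===== PORT A =====
-- the inner `for j in dicDeFrec[i]` loop with its break (stops as soon as max_films == 0)
def pvInnerA : Int × List String → List String → Int × List String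
  | st, [] => st
  | (k, acc), j :: js => if k ≠ 0 then pvInnerA (k - 1, acc ++ [j]) js else (k, acc)

def getMovieListWithoutRating (finalMovieList : List (String × Int)) (tokens : Int) : List String :=
  let d := PySem.Dict.ofList finalMovieList
  -- dicDeFrec = defaultdict(list); for movie in finalMovieList: dicDeFrec[finalMovieList[movie]].append(movie)
  let dicDeFrec := d.keys.foldl (fun b movie => b.modify (d.getD movie 0) [] (· ++ [movie])) PySem.Dict.empty
  -- (the defaultdict's read-inserts on `dicDeFrec[i]` are unobservable through getD; `frec = tokens` is dead code)
  -- max_films = 6; movielist = []; for i in range(tokens, 0, -1): ...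
  let st := (PySem.List.pyRange tokens 0 (-1)).foldl
    (fun (st : Int × List String) i =>
      if dicDeFrec.getD i [] ≠ [] then pvInnerA st (dicDeFrec.getD i []) else st)
    ((6 : Int), ([] : List String))
  st.2

-- ===== PORT B =====
def getMovieListWithoutRating_alt (finalMovieList : List (String × Int)) (tokens : Int) : List String :=
  let d := PySem.Dict.ofList finalMovieList
  let eligible := d.keys.filter (fun m => decide (1 ≤ d.getD m 0) && decide (d.getD m 0 ≤ tokens))
  (PySem.List.sorted eligible (fun m => d.getD m 0) true).take 6

-- ===== PRECONDITION & SPEC =====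
def Spec_getMovieListWithoutRating (finalMovieList : List (String × Int)) (tokens : Int) (out : List String) : Prop := out = getMovieListWithoutRating_alt finalMovieList tokens
instance (finalMovieList : List (String × Int)) (tokens : Int) (out : List String) : Decidable (Spec_getMovieListWithoutRating finalMovieList tokens out) := by unfold Spec_getMovieListWithoutRating; infer_instance

-- ===== CLAIM (what is proved, stated in full; the proofs are below) =====
def Claim_equal_getMovieListWithoutRating : Prop := ∀ (finalMovieList : List (String × Int)) (tokens : Int), Dom_getMovieListWithoutRating finalMovieList tokens → Spec_getMovieListWithoutRating finalMovieList tokens (getMovieListWithoutRating finalMovieList tokens)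

-- ===== LEMMAS AND PROOFS =====

-- range(t, 0, -1) is [t, t-1, ..., 1]
theorem pvRangeDown (t : Int) :
    PySem.List.pyRange t 0 (-1) = (List.range t.toNat).map (fun k : Nat => t - (k : Int)) := by
  unfold PySem.List.pyRange
  norm_num
  split
  · next h => simp [sub_eq_add_neg]
  · next h =>
    have : t.toNat = 0 := by omega
    simp [this]

theorem pvMemRangeDown (t i : Int) :
    i ∈ PySem.List.pyRange t 0 (-1) ↔ 1 ≤ i ∧ i ≤ t := by
  rw [pvRangeDown]
  constructor
  · intro hm
    obtain ⟨k, hk, rfl⟩ := List.mem_map.mp hm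
    have := List.mem_range.mp hk
    omega
  · rintro ⟨h1, h2⟩
    exact List.mem_map.mpr ⟨(t - i).toNat, List.mem_range.mpr (by omega), by omega⟩

theorem pvRangeDownPairwise (t : Int) :
    (PySem.List.pyRange t 0 (-1)).Pairwise (· > ·) := by
  rw [pvRangeDown]
  refine List.Pairwise.map _ ?_ (List.pairwise_lt_range)
  intro a b hab
  omega

-- the inner loop appends the first k elements of its bucket
theorem pvInnerA_spec (js : List String) : ∀ (k : Int) (acc : List String), 0 ≤ k →
    pvInnerA (k, acc) js = (k - min k js.length, acc ++ js.take k.toNat) := by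
  induction js with
  | nil => intro k acc hk; simp [pvInnerA]; omega
  | cons j js ih =>
    intro k acc hk
    by_cases hk0 : k = 0
    · subst hk0; simp [pvInnerA]; omega
    · rw [pvInnerA, if_pos hk0, ih (k - 1) (acc ++ [j]) (by omega)]
      rw [Prod.mk.injEq]
      refine ⟨by simp; omega, ?_⟩
      have h2 : k.toNat = (k - 1).toNat + 1 := by omega
      rw [h2, List.take_succ_cons, List.append_assoc]
      simp

-- the whole countdown loop appends the first k elements of the concatenated buckets
theorem pvOuterA_spec (B : Int → List String) (is : List Int) : ∀ (k : Int) (acc : List String), 0 ≤ k →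
    is.foldl (fun (st : Int × List String) i => if B i ≠ [] then pvInnerA st (B i) else st) (k, acc)
      = (k - min k (is.flatMap B).length, acc ++ (is.flatMap B).take k.toNat) := by
  induction is with
  | nil => intro k acc hk; simp; omega
  | cons i is ih =>
    intro k acc hk
    rw [List.foldl_cons]
    by_cases hB : B i = []
    · have he : (if B i ≠ [] then pvInnerA (k, acc) (B i) else (k, acc)) = (k, acc) := by
        simp [hB]
      rw [he, ih k acc hk, List.flatMap_cons, hB, List.nil_append]
    · rw [if_pos (by simpa using hB), pvInnerA_spec _ _ _ hk,
        ih (k - min k (B i).length) (acc ++ (B i).take k.toNat) (by omega)]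
      rw [List.flatMap_cons, Prod.mk.injEq]
      refine ⟨by rw [List.length_append]; push_cast; omega, ?_⟩
      rw [List.take_append, List.append_assoc]
      have h3 : (k - min k ((B i).length : Int)).toNat = k.toNat - (B i).length := by omega
      rw [h3]

theorem pvInsertBy_append (before : String → String → Bool) (x : String) (l m : List String)
    (h : ∀ y ∈ l, before x y = false) :
    PySem.List.insertBy before x (l ++ m) = l ++ PySem.List.insertBy before x m := by
  induction l with
  | nil => simp
  | cons y l ih =>
    rw [List.cons_append, PySem.List.insertBy, if_neg (by simp [h y (by simp)]),
      ih (fun z hz => h z (by simp [hz])), List.cons_append]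

theorem pvInsertBy_front (before : String → String → Bool) (x : String) (m : List String)
    (h : ∀ y ∈ m, before x y = true) :
    PySem.List.insertBy before x m = x :: m := by
  cases m with
  | nil => rfl
  | cons y m => rw [PySem.List.insertBy, if_pos (h y (by simp))]

-- inserting x into strictly descending buckets appends it to the end of its own bucket
theorem pvInsertFlat (key : String → Int) (x : String) (r : List Int)
    (hr : r.Pairwise (· > ·)) (hx : key x ∈ r) (B : Int → List String)
    (hB : ∀ i ∈ r, ∀ y ∈ B i, key y = i) :
    PySem.List.insertBy (fun a b => decide (key b < key a)) x (r.flatMap B)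
      = r.flatMap (fun i => B i ++ if key x == i then [x] else []) := by
  induction r with
  | nil => simp at hx
  | cons i r ih =>
    rw [List.flatMap_cons, List.flatMap_cons]
    by_cases hxi : key x = i
    · rw [pvInsertBy_append _ _ _ _ (fun y hy => by
        simp [hB i (by simp) y hy, hxi])]
      have hall : ∀ y ∈ r.flatMap B, (fun a b => decide (key b < key a)) x y = true := by
        intro y hy
        obtain ⟨j, hj, hyj⟩ := List.mem_flatMap.mp hy
        have hji : j < i := List.rel_of_pairwise_cons hr hj
        simp [hB j (by simp [hj]) y hyj, hxi]
        omega
      rw [pvInsertBy_front _ _ _ hall, if_pos (by simp [hxi])]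
      have hnot : ∀ j ∈ r, ¬ (key x == j) = true := by
        intro j hj
        have hji : j < i := List.rel_of_pairwise_cons hr hj
        simp [hxi]; omega
      have hsame : r.flatMap (fun i => B i ++ if key x == i then [x] else []) = r.flatMap B := by
        apply List.flatMap_congr
        intro j hj
        simp [hnot j hj]
      rw [hsame]
      simp
    · have hxr : key x ∈ r := by
        rcases List.mem_cons.mp hx with h | h
        · exact absurd h hxi
        · exact h
      rw [pvInsertBy_append _ _ _ _ (fun y hy => by
        have hxlt : key x < i := List.rel_of_pairwise_cons hr hxr
        simp [hB i (by simp) y hy]; omega)]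
      rw [ih hr.tail hxr (fun j hj y hy => hB j (by simp [hj]) y hy), if_neg (by simp [hxi])]
      simp

-- stable descending sort = concatenation of the buckets over any strictly decreasing key list
theorem pvSortFlat (key : String → Int) (r : List Int) (hr : r.Pairwise (· > ·)) :
    ∀ (xs : List String), (∀ x ∈ xs, key x ∈ r) →
    PySem.List.sorted xs key true = r.flatMap (fun i => xs.filter (fun x => key x == i)) := by
  intro xs
  induction xs using List.reverseRecOn with
  | nil => intro _; simp [PySem.List.sorted_rev_eq_foldl_insertBy]
  | append_singleton xs x ih =>
    intro hmem
    rw [PySem.List.sorted_rev_eq_foldl_insertBy, List.foldl_append, List.foldl_cons,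
      List.foldl_nil, ← PySem.List.sorted_rev_eq_foldl_insertBy,
      ih (fun y hy => hmem y (by simp [hy]))]
    rw [pvInsertFlat key x r hr (hmem x (by simp)) _
      (fun i hi y hy => by simpa using (List.mem_filter.mp hy).2)]
    apply List.flatMap_congr
    intro i hi
    by_cases hxi : key x = i <;> simp [List.filter_append, hxi]

-- A's grouping loop builds exactly the per-frequency buckets
theorem pvBucket (d : PySem.Dict String Int) (i : Int) :
    (d.keys.foldl (fun b movie => b.modify (d.getD movie 0) [] (· ++ [movie])) PySem.Dict.empty).getD i []
      = d.keys.filter (fun m => d.getD m 0 == i) := by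
  have h := List.foldl_map (f := fun m : String => (d.getD m 0, m))
    (g := fun (b : PySem.Dict Int (List String)) (p : Int × String) => b.modify p.1 [] (· ++ [p.2]))
    (l := d.keys) (init := PySem.Dict.empty)
  simp only at h
  rw [← h, PySem.Dict.getD_foldl_modify_append, List.filter_map, List.map_map]
  simp [Function.comp_def]

theorem pvMain (finalMovieList : List (String × Int)) (tokens : Int) :
    getMovieListWithoutRating finalMovieList tokens = getMovieListWithoutRating_alt finalMovieList tokens := by
  unfold getMovieListWithoutRating getMovieListWithoutRating_alt
  set d := PySem.Dict.ofList finalMovieList with hd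
  simp only
  set r := PySem.List.pyRange tokens 0 (-1) with hrdef
  have hb : ∀ i : Int,
      (d.keys.foldl (fun b movie => b.modify (d.getD movie 0) [] (· ++ [movie])) PySem.Dict.empty).getD i []
        = d.keys.filter (fun m => d.getD m 0 == i) := fun i => pvBucket d i
  rw [pvOuterA_spec _ r 6 [] (by norm_num)]
  simp only [List.nil_append]
  set key : String → Int := fun m => d.getD m 0 with hkey
  set eligible := d.keys.filter (fun m => decide (1 ≤ key m) && decide (key m ≤ tokens)) with helig
  have hflat : r.flatMap (fun i => (d.keys.foldl (fun b movie => b.modify (d.getD movie 0) [] (· ++ [movie])) PySem.Dict.empty).getD i [])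
      = r.flatMap (fun i => eligible.filter (fun x => key x == i)) := by
    apply List.flatMap_congr
    intro i hi
    have hir : 1 ≤ i ∧ i ≤ tokens := (pvMemRangeDown tokens i).mp hi
    rw [hb i, helig, List.filter_filter]
    apply List.filter_congr
    intro m _
    by_cases h : key m = i
    · have h' : d.getD m 0 = i := h
      simp [h']
      exact ⟨h, by omega, by omega⟩
    · have h' : ¬ d.getD m 0 = i := h
      simp [hkey, h']
  have hsort : PySem.List.sorted eligible key true
      = r.flatMap (fun i => eligible.filter (fun x => key x == i)) := by
    apply pvSortFlat key r (pvRangeDownPairwise tokens)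
    intro x hx
    rw [pvMemRangeDown]
    have := List.mem_filter.mp hx
    simpa using this.2
  rw [hflat, ← hsort]
  rfl

-- ===== VERDICT (by name: the statement is the Claim_ definition above) =====
theorem getMovieListWithoutRating_spec : Claim_equal_getMovieListWithoutRating := by
  intro finalMovieList tokens _
  unfold Spec_getMovieListWithoutRating
  exact pvMain finalMovieList tokens
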